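-- pv_equiv track=rewrite | github.com/VyacheslavZalygin/PyEducation2021 | ReshuEGE/5/binary/35894.py | f
-- ===== SOURCE A (Python) =====
-- def f(n):
--     n = bin(n)[2:]
--     for _ in range(3):
--         one, null = 0, 0
--         for x in n:
--             if x == "1": one += 1
--             else: null += 1
--         if one == null:
--             n += n[-1]
--         else:
--             if one < null:
--                 n += "1"
--             else:
--                 n += "0"
--     return int(n, 2)
-- ===== SOURCE B (Python) =====
-- def f(n):
--     s = bin(n)[2:]
--     one = s.count("1")
--     null = len(s) - one
--     last = s[-1]
--     for _ in range(3):
--         if one < null: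
--             bit = "1"
--         elif null < one:
--             bit = "0"
--         else:
--             bit = last
--         s += bit
--         if bit == "1":
--             one += 1
--         else:
--             null += 1
--         last = bit
--     return int(s, 2)
-- ===== Notes on version B (the rewrite author's own statement) =====
-- stated objective: alternative
-- what changed: B counts the '1'/'0' digits once in a single up-front scan and then maintains the two counts and the last character incrementally across the 3 append steps, instead of A's full rescan of the growing string in every iteration.
import Mathlib
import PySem

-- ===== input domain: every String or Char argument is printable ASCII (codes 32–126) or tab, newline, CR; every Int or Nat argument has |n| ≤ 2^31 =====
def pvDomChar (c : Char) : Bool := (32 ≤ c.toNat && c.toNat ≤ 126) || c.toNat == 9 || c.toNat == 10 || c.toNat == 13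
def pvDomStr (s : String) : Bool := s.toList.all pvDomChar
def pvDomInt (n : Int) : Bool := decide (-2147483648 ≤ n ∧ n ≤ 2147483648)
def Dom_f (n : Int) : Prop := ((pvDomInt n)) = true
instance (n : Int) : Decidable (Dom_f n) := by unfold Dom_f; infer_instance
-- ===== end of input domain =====

-- B replaces A's per-iteration rescan of the growing string by one up-front digit count
-- plus O(1) incremental updates of the counts and the last character (objective: alternative).

-- ===== PORT A =====
-- one body iteration of A's 'for _ in range(3)' loop: recount the whole string, then append
def stepA (s : List Char) : List Char :=
  let p := s.foldl (fun (p : Int × Int) x => if x = '1' then (p.1 + 1, p.2) else (p.1, p.2 + 1)) (0, 0)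
  if p.1 = p.2 then s ++ [(PySem.List.pyGet? s (-1)).getD ' ']   -- n += n[-1]; the default is unreachable under Pre_f
  else if p.1 < p.2 then s ++ ['1'] else s ++ ['0']

def f (n : Int) : Int :=
  let s := PySem.List.slice (PySem.Int.toBinChars0b n) (some 2) none      -- bin(n)[2:]
  let s := (PySem.List.pyRange 0 3 1).foldl (fun s _ => stepA s) s
  (PySem.Int.ofCharsBase? s 2).getD 0                                     -- int(n, 2); some under Pre_f

-- ===== PORT B =====
-- one body iteration of B's loop: decide the bit from the maintained counts and last char, no rescan
def stepB (st : List Char × Int × Int × Char) : List Char × Int × Int × Char :=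
  let bit : Char := if st.2.1 < st.2.2.1 then '1' else if st.2.2.1 < st.2.1 then '0' else st.2.2.2
  (st.1 ++ [bit],
   (if bit = '1' then st.2.1 + 1 else st.2.1),
   (if bit = '1' then st.2.2.1 else st.2.2.1 + 1),
   bit)

def f_alt (n : Int) : Int :=
  let s := PySem.List.slice (PySem.Int.toBinChars0b n) (some 2) none      -- bin(n)[2:]
  let one : Int := PySem.List.count s '1'                                 -- s.count("1")
  let null : Int := (s.length : Int) - one
  let last : Char := (PySem.List.pyGet? s (-1)).getD ' '                  -- s[-1]; default unreachable under Pre_f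
  let st := (PySem.List.pyRange 0 3 1).foldl (fun st _ => stepB st) (s, one, null, last)
  (PySem.Int.ofCharsBase? st.1 2).getD 0

-- ===== PRECONDITION & SPEC =====
-- Pre_f excludes negative n, on which A raises ValueError in int(n, 2) (the sliced bin string keeps a 'b').
def Pre_f (n : Int) : Prop := 0 ≤ n
instance (n : Int) : Decidable (Pre_f n) := by unfold Pre_f; infer_instance
def pvWitness_f : Int := 6

def Spec_f (n : Int) (out : Int) : Prop := out = f_alt n
instance (n : Int) (out : Int) : Decidable (Spec_f n out) := by unfold Spec_f; infer_instance

-- ===== CLAIM (what is proved, stated in full; the proofs are below) =====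
def Claim_equal_f : Prop := ∀ (n : Int), Dom_f n → Pre_f n → Spec_f n (f n)

-- ===== LEMMAS AND PROOFS =====

theorem countLoop_eq : ∀ (s : List Char) (a b : Int),
    s.foldl (fun (p : Int × Int) x => if x = '1' then (p.1 + 1, p.2) else (p.1, p.2 + 1)) (a, b)
      = (a + (s.count '1' : Int), b + ((s.length : Int) - (s.count '1' : Int))) := by
  intro s
  induction s with
  | nil => intro a b; simp
  | cons x xs ih =>
    intro a b
    by_cases hx : x = '1' <;>
      simp [hx, List.foldl_cons, ih] <;> omega

theorem step_eq (s : List Char) :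
    stepB (s, (s.count '1' : Int), (s.length : Int) - (s.count '1' : Int), s.getLast?.getD ' ')
      = (stepA s, ((stepA s).count '1' : Int),
         ((stepA s).length : Int) - ((stepA s).count '1' : Int), (stepA s).getLast?.getD ' ') := by
  have hcnt := countLoop_eq s 0 0
  unfold stepA stepB
  simp only [hcnt, PySem.List.pyGet?_neg_one, zero_add]
  by_cases h1 : (s.count '1' : Int) < (s.length : Int) - (s.count '1' : Int)
  · have hne : ¬ ((s.count '1' : Int) = (s.length : Int) - (s.count '1' : Int)) := by omega
    simp [h1, hne, List.count_append]
  · by_cases h2 : (s.length : Int) - (s.count '1' : Int) < (s.count '1' : Int)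
    · have hne : ¬ ((s.count '1' : Int) = (s.length : Int) - (s.count '1' : Int)) := by omega
      simp [h1, h2, hne, List.count_append]
      omega
    · have heq : (s.count '1' : Int) = (s.length : Int) - (s.count '1' : Int) := by omega
      simp only [if_neg h1, if_neg h2, if_pos heq]
      by_cases hl : s.getLast?.getD ' ' = '1' <;>
        simp [hl, List.count_append] <;> omega

-- ===== VERDICT (by name: the statement is the Claim_ definition above) =====
theorem f_spec : Claim_equal_f := by
  intro n _ _
  unfold Spec_f f f_alt
  set s : List Char := PySem.List.slice (PySem.Int.toBinChars0b n) (some 2) none with hsdef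
  have hrange : PySem.List.pyRange 0 3 1 = [0, 1, 2] := by decide
  have hlast : (PySem.List.pyGet? s (-1)).getD ' ' = s.getLast?.getD ' ' := by
    rw [PySem.List.pyGet?_neg_one]
  have hone : (PySem.List.count s '1' : Int) = (s.count '1' : Int) := by
    simp [PySem.List.count_eq]
  simp only [hrange, List.foldl_cons, List.foldl_nil, hlast, hone]
  rw [step_eq s, step_eq _, step_eq _]
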